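-- pv_equiv track=rewrite | github.com/joaotavora/rassumfrassum | lspylex.py | parse_server_commands
-- ===== SOURCE A (Python) =====
-- def parse_server_commands(args: list[str]) -> tuple[list[str], list[list[str]]]:
--     """
--     Split args on '--' separators.
--     Returns (lspylex_args, [server_command1, server_command2, ...])
--     """
--     if '--' not in args:
--         return args, []
--
--     # Find all '--' separator indices
--     separator_indices = [i for i, arg in enumerate(args) if arg == '--']
--
--     # Everything before first '--' is lspylex options
--     lspylex_args = args[:separator_indices[0]]
--
--     # Split server commands
--     server_commands : list[list[str]] = []
--     for i, sep_idx in enumerate(separator_indices):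
--         # Find start and end of this server command
--         start = sep_idx + 1
--         end = separator_indices[i + 1] if i + 1 < len(separator_indices) else len(args)
--
--         server_cmd : list[str] = args[start:end]
--         if server_cmd:  # Only add non-empty commands
--             server_commands.append(server_cmd)
--
--     return lspylex_args, server_commands
-- ===== SOURCE B (Python) =====
-- def parse_server_commands(args: list[str]) -> tuple[list[str], list[list[str]]]:
--     """Single accumulator pass: build segments by splitting on '--' as we go."""
--     segments: list[list[str]] = []
--     current: list[str] = []
--     for a in args:
--         if a == '--':
--             segments.append(current)
--             current = []
--         else:
--             current.append(a)
--     segments.append(current)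
--     return segments[0], [s for s in segments[1:] if s]
-- ===== Notes on version B (the rewrite author's own statement) =====
-- stated objective: simpler
-- what changed: B replaces A's precomputed separator-index list with slicing between consecutive indices by a single accumulator pass that appends to a current segment and pushes it on each '--'; the first segment is returned as-is and the later segments are filtered for emptiness.
import Mathlib
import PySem

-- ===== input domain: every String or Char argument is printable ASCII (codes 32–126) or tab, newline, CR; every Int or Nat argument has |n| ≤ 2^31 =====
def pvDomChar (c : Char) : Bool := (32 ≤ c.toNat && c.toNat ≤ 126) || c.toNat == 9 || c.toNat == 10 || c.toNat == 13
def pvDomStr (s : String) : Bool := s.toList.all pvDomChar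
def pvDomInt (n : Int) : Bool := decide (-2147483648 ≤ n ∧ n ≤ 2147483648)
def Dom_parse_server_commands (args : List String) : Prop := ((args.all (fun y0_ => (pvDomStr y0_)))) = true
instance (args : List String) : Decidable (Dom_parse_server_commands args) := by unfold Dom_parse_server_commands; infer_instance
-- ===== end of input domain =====

-- B replaces A's separator-index precomputation + slicing by one accumulator pass over args; objective: simpler.

-- ===== PORT A =====
def parse_server_commands (args : List String) : List String × List (List String) :=
  if "--" ∉ args then (args, [])
  else
    let separator_indices : List Int :=
      ((PySem.List.enumerate args 0).filter (fun p => p.2 == "--")).map (fun p => p.1)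
    let lspylex_args := PySem.List.slice args none (some (PySem.List.pyGetD separator_indices 0 0))
    let server_commands : List (List String) :=
      (PySem.List.enumerate separator_indices 0).foldl (fun acc p =>
        let start := p.2 + 1
        let e := if p.1 + 1 < (separator_indices.length : Int)
                 then PySem.List.pyGetD separator_indices (p.1 + 1) 0
                 else (args.length : Int)
        let server_cmd := PySem.List.slice args (some start) (some e)
        if server_cmd ≠ [] then acc ++ [server_cmd] else acc) []
    (lspylex_args, server_commands)

-- ===== PORT B =====
-- B-side helper: the loop body of Source B's single pass
def pvStep (st : List (List String) × List String) (a : String) : List (List String) × List String :=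
  if a == "--" then (st.1 ++ [st.2], []) else (st.1, st.2 ++ [a])

def parse_server_commands_alt (args : List String) : List String × List (List String) :=
  let st := args.foldl pvStep ([], [])
  let segments := st.1 ++ [st.2]
  match segments with
  | [] => ([], [])
  | first :: rest => (first, rest.filter (fun s => !s.isEmpty))

-- ===== PRECONDITION & SPEC =====
def Spec_parse_server_commands (args : List String) (out : List String × List (List String)) : Prop := out = parse_server_commands_alt args
instance (args : List String) (out : List String × List (List String)) : Decidable (Spec_parse_server_commands args out) := by unfold Spec_parse_server_commands; infer_instance

-- ===== CLAIM (what is proved, stated in full; the proofs are below) =====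
def Claim_equal_parse_server_commands : Prop := ∀ (args : List String), Dom_parse_server_commands args → Spec_parse_server_commands args (parse_server_commands args)

-- ===== LEMMAS AND PROOFS =====

-- Segments of a list split on "--" (last segment = the still-open one); always nonempty.
def pvSegs : List String → List (List String)
  | [] => [[]]
  | a :: rest =>
    if a = "--" then [] :: pvSegs rest
    else match pvSegs rest with
      | [] => [[a]]
      | s :: ss => (a :: s) :: ss

def pvCons (cur : List String) : List (List String) → List (List String)
  | [] => [cur]
  | s :: ss => (cur ++ s) :: ss

theorem pvSegs_ne_nil (xs : List String) : pvSegs xs ≠ [] := by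
  cases xs with
  | nil => simp [pvSegs]
  | cons a rest =>
    simp only [pvSegs]
    split
    · simp
    · split <;> simp_all

theorem pvFoldl (xs : List String) : ∀ (segs : List (List String)) (cur : List String),
    (xs.foldl pvStep (segs, cur)).1 ++ [(xs.foldl pvStep (segs, cur)).2]
      = segs ++ pvCons cur (pvSegs xs) := by
  induction xs with
  | nil => intro segs cur; simp [pvCons, pvSegs]
  | cons a rest ih =>
    intro segs cur
    obtain ⟨s, ss, hs⟩ : ∃ s ss, pvSegs rest = s :: ss := by
      cases h : pvSegs rest with
      | nil => exact absurd h (pvSegs_ne_nil rest)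
      | cons s ss => exact ⟨s, ss, rfl⟩
    by_cases ha : a = "--"
    · simp only [List.foldl_cons, pvStep, ha, beq_self_eq_true, if_pos]
      rw [ih]
      simp [pvSegs, hs, pvCons]
    · simp only [List.foldl_cons, pvStep, beq_iff_eq, ha, if_false]
      rw [ih]
      simp [pvSegs, ha, hs, pvCons]

theorem pvAlt_eq (args : List String) (s : List String) (ss : List (List String))
    (h : pvSegs args = s :: ss) :
    parse_server_commands_alt args = (s, ss.filter (fun t => !t.isEmpty)) := by
  have hf := pvFoldl args [] []
  rw [h] at hf
  simp only [pvCons, List.nil_append] at hf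
  simp only [parse_server_commands_alt]
  rw [hf]

-- separator indices, with absolute start offset
def pvIdxsFrom (s : Int) : List String → List Int
  | [] => []
  | a :: rest => if a = "--" then s :: pvIdxsFrom (s + 1) rest else pvIdxsFrom (s + 1) rest

theorem pvIdxs_eq (xs : List String) : ∀ (s : Int),
    ((PySem.List.enumerate xs s).filter (fun p => p.2 == "--")).map (fun p => p.1)
      = pvIdxsFrom s xs := by
  induction xs with
  | nil => intro s; simp [PySem.List.enumerate_nil, pvIdxsFrom]
  | cons a rest ih =>
    intro s
    rw [PySem.List.enumerate_cons]
    by_cases ha : a = "--" <;> simp [pvIdxsFrom, ha, ih]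

theorem pvIdxsFrom_append (pre : List String) : ∀ (s : Int) (l : List String), "--" ∉ pre →
    pvIdxsFrom s (pre ++ l) = pvIdxsFrom (s + pre.length) l := by
  induction pre with
  | nil => intro s l _; simp
  | cons a pre ih =>
    intro s l h
    have ha : a ≠ "--" := fun e => h (by simp [e])
    have : "--" ∉ pre := fun e => h (by simp [e])
    simp only [List.cons_append, pvIdxsFrom, if_neg ha, ih (s + 1) l this]
    congr 1
    simp only [List.length_cons]
    push_cast
    ring

theorem pvIdxsFrom_nil_of_not_mem (xs : List String) : ∀ (s : Int), "--" ∉ xs →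
    pvIdxsFrom s xs = [] := by
  induction xs with
  | nil => intro s _; rfl
  | cons a rest ih =>
    intro s h
    have ha : a ≠ "--" := fun e => h (by simp [e])
    simp only [pvIdxsFrom, if_neg ha]
    exact ih _ (fun e => h (by simp [e]))

theorem pvSegs_of_not_mem (xs : List String) (h : "--" ∉ xs) : pvSegs xs = [xs] := by
  induction xs with
  | nil => rfl
  | cons a rest ih =>
    have ha : a ≠ "--" := fun e => h (by simp [e])
    have hr := ih (fun e => h (by simp [e]))
    simp [pvSegs, ha, hr]

theorem pvSegs_append (pre : List String) : ∀ (rest : List String), "--" ∉ pre →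
    pvSegs (pre ++ "--" :: rest) = pre :: pvSegs rest := by
  induction pre with
  | nil => intro rest _; simp [pvSegs]
  | cons a pre ih =>
    intro rest h
    have ha : a ≠ "--" := fun e => h (by simp [e])
    have hr := ih rest (fun e => h (by simp [e]))
    simp [pvSegs, ha, hr]

theorem pvSplit_first (args : List String) (h : "--" ∈ args) :
    ∃ pre rest, "--" ∉ pre ∧ args = pre ++ "--" :: rest := by
  induction args with
  | nil => simp at h
  | cons a rest ih =>
    by_cases ha : a = "--"
    · exact ⟨[], rest, by simp, by simp [ha]⟩
    · have : "--" ∈ rest := by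
        rcases List.mem_cons.mp h with h1 | h1
        · exact absurd h1.symm ha
        · exact h1
      obtain ⟨pre, r, hp, he⟩ := ih this
      exact ⟨a :: pre, r, by simp [hp, Ne.symm ha], by simp [he]⟩

-- A's loop, as a recursion over the (absolute) separator-index list
def pvChunks (args : List String) (n : Int) : List Int → List (List String)
  | [] => []
  | [a] =>
      let c := PySem.List.slice args (some (a + 1)) (some n)
      if c ≠ [] then [c] else []
  | a :: b :: t =>
      let c := PySem.List.slice args (some (a + 1)) (some b)
      (if c ≠ [] then [c] else []) ++ pvChunks args n (b :: t)

theorem pvLoop (args : List String) (L : List Int) :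
    ∀ (l done : List Int) (acc : List (List String)), L = done ++ l →
    (PySem.List.enumerate l (done.length : Int)).foldl (fun acc p =>
        let start := p.2 + 1
        let e := if p.1 + 1 < (L.length : Int)
                 then PySem.List.pyGetD L (p.1 + 1) 0
                 else (args.length : Int)
        let server_cmd := PySem.List.slice args (some start) (some e)
        if server_cmd ≠ [] then acc ++ [server_cmd] else acc) acc
    = acc ++ pvChunks args (args.length : Int) l := by
  intro l
  induction l with
  | nil => intro done acc _; simp [PySem.List.enumerate_nil, pvChunks]
  | cons a l' ih =>
    intro done acc hL
    rw [PySem.List.enumerate_cons]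
    simp only [List.foldl_cons]
    cases l' with
    | nil =>
      have hlen : L.length = done.length + 1 := by rw [hL]; simp
      have hcond : ¬ ((done.length : Int) + 1 < (L.length : Int)) := by
        rw [hlen]; push_cast; omega
      simp only [if_neg hcond, PySem.List.enumerate_nil, List.foldl_nil, pvChunks]
      split <;> simp
    | cons b t =>
      have hlen : L.length = done.length + (t.length + 2) := by rw [hL]; simp
      have hcond : ((done.length : Int) + 1 < (L.length : Int)) := by
        rw [hlen]; push_cast; omega
      have hget : PySem.List.pyGetD L ((done.length : Int) + 1) 0 = b := by
        have : ((done.length : Int) + 1) = ((done.length + 1 : Nat) : Int) := by push_cast; ring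
        rw [this, PySem.List.pyGetD_natCast, hL]
        rw [List.getD_eq_getElem?_getD]
        rw [List.getElem?_append_right (by omega)]
        simp
      simp only [hcond, if_pos, hget]
      have hdone : ((done ++ [a]).length : Int) = (done.length : Int) + 1 := by
        simp
      have := ih (done ++ [a])
        (if PySem.List.slice args (some (a + 1)) (some b) ≠ []
         then acc ++ [PySem.List.slice args (some (a + 1)) (some b)] else acc)
        (by rw [hL]; simp)
      rw [hdone] at this
      rw [this, pvChunks]
      split <;> simp

theorem pvChunks_eq (args : List String) : ∀ (N : Nat) (rest : List String) (p : Nat),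
    rest.length ≤ N → args.drop (p + 1) = rest →
    pvChunks args (args.length : Int) ((p : Int) :: pvIdxsFrom ((p : Int) + 1) rest)
      = (pvSegs rest).filter (fun t => !t.isEmpty) := by
  intro N
  induction N with
  | zero =>
    intro rest p hlen hdrop
    have hrest : rest = [] := List.eq_nil_of_length_eq_zero (by omega)
    subst hrest
    rw [pvIdxsFrom_nil_of_not_mem _ _ (by simp)]
    have hc : ((p : Int) + 1) = (((p + 1 : Nat)) : Int) := by push_cast; ring
    simp only [pvChunks, hc, PySem.List.slice_natCast, hdrop]
    simp [pvSegs]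
  | succ N ih =>
    intro rest p hlen hdrop
    by_cases hmem : "--" ∈ rest
    · obtain ⟨pre', rest', hpre, hrest⟩ := pvSplit_first rest hmem
      have hq : ((p : Int) + 1 + (pre'.length : Int)) = (((p + 1 + pre'.length : Nat)) : Int) := by
        push_cast; ring
      have hidx : pvIdxsFrom ((p : Int) + 1) rest
          = ((p + 1 + pre'.length : Nat) : Int) :: pvIdxsFrom (((p + 1 + pre'.length : Nat) : Int) + 1) rest' := by
        rw [hrest, pvIdxsFrom_append pre' _ _ hpre]
        simp only [pvIdxsFrom, ite_true]
        rw [hq]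
      rw [hidx]
      have hc : ((p : Int) + 1) = (((p + 1 : Nat)) : Int) := by push_cast; ring
      have hslice : PySem.List.slice args (some ((p : Int) + 1)) (some ((p + 1 + pre'.length : Nat) : Int))
          = pre' := by
        rw [hc, PySem.List.slice_natCast, hdrop, hrest]
        have : p + 1 + pre'.length - (p + 1) = pre'.length := by omega
        rw [this, List.take_left]
      have hdrop' : args.drop (p + 1 + pre'.length + 1) = rest' := by
        have : args.drop (p + 1 + pre'.length + 1) = (args.drop (p + 1)).drop (pre'.length + 1) := by
          rw [List.drop_drop]; try congr 1; try omega
        rw [this, hdrop, hrest]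
        simp
      have hlen' : rest'.length ≤ N := by
        have : rest.length = pre'.length + 1 + rest'.length := by rw [hrest]; simp; omega
        omega
      have hrec := ih rest' (p + 1 + pre'.length) hlen' hdrop'
      simp only [pvChunks, hslice]
      rw [hrec, hrest, pvSegs_append pre' rest' hpre]
      cases pre' <;> simp
    · rw [pvIdxsFrom_nil_of_not_mem _ _ hmem]
      have hc : ((p : Int) + 1) = (((p + 1 : Nat)) : Int) := by push_cast; ring
      have htake : args.length - (p + 1) = rest.length := by
        rw [← hdrop]; simp
      simp only [pvChunks, hc, PySem.List.slice_natCast, hdrop, htake, List.take_length]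
      rw [pvSegs_of_not_mem rest hmem]
      cases rest <;> simp

-- ===== VERDICT (by name: the statement is the Claim_ definition above) =====
theorem parse_server_commands_spec : Claim_equal_parse_server_commands := by
  intro args _
  unfold Spec_parse_server_commands
  by_cases hmem : "--" ∈ args
  · obtain ⟨pre, rest, hpre, hargs⟩ := pvSplit_first args hmem
    have hidx0 : ((PySem.List.enumerate args 0).filter (fun p => p.2 == "--")).map (fun p => p.1)
        = (pre.length : Int) :: pvIdxsFrom ((pre.length : Int) + 1) rest := by
      rw [pvIdxs_eq, hargs, pvIdxsFrom_append pre _ _ hpre]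
      simp [pvIdxsFrom]
    have hdrop : args.drop (pre.length + 1) = rest := by
      rw [hargs, show pre ++ "--" :: rest = (pre ++ ["--"]) ++ rest by simp]
      rw [show pre.length + 1 = (pre ++ ["--"]).length by simp]
      exact List.drop_left
    have hloop := pvLoop args ((pre.length : Int) :: pvIdxsFrom ((pre.length : Int) + 1) rest)
        ((pre.length : Int) :: pvIdxsFrom ((pre.length : Int) + 1) rest) [] [] rfl
    simp only [List.length_nil, Nat.cast_zero, List.nil_append] at hloop
    have hchunks := pvChunks_eq args rest.length rest pre.length le_rfl hdrop
    have hsegs : pvSegs args = pre :: pvSegs rest := by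
      rw [hargs]; exact pvSegs_append pre rest hpre
    rw [pvAlt_eq args pre (pvSegs rest) hsegs]
    simp only [parse_server_commands]
    rw [if_neg (by simp [hmem])]
    rw [hidx0, hloop, hchunks]
    rw [PySem.List.pyGetD_zero_cons, PySem.List.slice_to_natCast]
    rw [hargs, List.take_left]
  · have hsegs : pvSegs args = [args] := pvSegs_of_not_mem args hmem
    rw [pvAlt_eq args args [] hsegs]
    simp only [parse_server_commands]
    rw [if_pos hmem]
    simp
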